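-- pv_equiv track=rewrite | github.com/ShuvalovAnthony/ege | 23/ya.py | f
-- ===== SOURCE A (Python) =====
-- def f(start, stop):
--     if start == stop: return 1
--     if (start > stop) or (start == 81): return 0
--
--     return (
--         f(start + int(str(start)[0]), stop) +
--         f(start + 3, stop) +
--         f(start * 2 - 1, stop)
--     )
-- ===== SOURCE B (Python) =====
-- def f(start, stop):
--     # Bottom-up DP: dp[i] = number of paths from start+i to stop, filled from stop down to start.
--     if start == stop:
--         return 1
--     if start > stop or start == 81:
--         return 0
--     n = stop - start
--     dp = [0] * (n + 1)
--     dp[n] = 1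
--     for i in range(n - 1, -1, -1):
--         s = start + i
--         if s != 81:
--             def at(j):
--                 return dp[j] if 0 <= j <= n else 0
--             dp[i] = at(i + int(str(s)[0])) + at(i + 3) + at(s * 2 - 1 - start)
--     return dp[0]
-- ===== Notes on version B (the rewrite author's own statement) =====
-- stated objective: alternative
-- what changed: Replaced A's three-way recursion by a bottom-up dynamic-programming table filled once from stop down to start (intended as faster; a timing run could not confirm a ratio because A times out where B returns).
-- outside the precondition, e.g. on f(0, 5): A does not finish within the time limit, B returns 1; on f(1, 5): A does not finish within the time limit, B returns 2; on f(-3, 5): A raises ValueError, B raises ValueError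
import Mathlib
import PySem

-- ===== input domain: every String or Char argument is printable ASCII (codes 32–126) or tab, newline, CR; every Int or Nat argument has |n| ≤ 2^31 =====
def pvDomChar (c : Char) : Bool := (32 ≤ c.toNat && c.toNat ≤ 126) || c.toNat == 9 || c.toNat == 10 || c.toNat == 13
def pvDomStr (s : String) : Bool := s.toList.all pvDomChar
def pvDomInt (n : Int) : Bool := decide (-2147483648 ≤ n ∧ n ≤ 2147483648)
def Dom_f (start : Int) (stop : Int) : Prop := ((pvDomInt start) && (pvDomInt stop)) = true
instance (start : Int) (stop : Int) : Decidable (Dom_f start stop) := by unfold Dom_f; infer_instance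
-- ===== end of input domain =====

-- B replaces A's three-way recursion by a bottom-up DP table filled once from stop down to start
-- (intended as faster; a timing run could not confirm a ratio, so no speed is claimed).

-- int(str(s)[0]): none models Python's ValueError (negative s: int('-')); exact for s ≥ 0
def fdg? (s : Int) : Option Int :=
  (PySem.List.pyGet? (PySem.Int.toChars s) 0).bind (fun c => PySem.Int.ofChars? [c])

-- total form of int(str(s)[0]), used by B where the loop only ever sees s ≥ 2
def fdg (s : Int) : Int := (fdg? s).getD 0

-- ===== PORT A =====
-- A's recursion is partial in Python: it raises ValueError for negative start below stop and
-- diverges for start ∈ {0,1} below stop. 'none' models both; the fuel (stop - start).toNat + 1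
-- only makes the same recursion total — under Pre_f it never runs out (proved below).
def fAux (stop : Int) : Nat → Int → Option Int
  | 0, _ => none
  | fuel+1, s =>
    if s = stop then some 1
    else if stop < s ∨ s = 81 then some 0
    else
      (fdg? s).bind fun d =>
      (fAux stop fuel (s + d)).bind fun x =>
      (fAux stop fuel (s + 3)).bind fun y =>
      (fAux stop fuel (s * 2 - 1)).bind fun z =>
      some (x + y + z)

def f (start : Int) (stop : Int) : Int := (fAux stop ((stop - start).toNat + 1) start).getD 0

-- ===== PORT B =====
def fVal (n : Int) (dp : Array Int) (j : Int) : Int :=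
  if 0 ≤ j ∧ j ≤ n then dp.getD j.toNat 0 else 0

def fStep (start n : Int) (dp : Array Int) (i : Int) : Array Int :=
  let s := start + i
  if s = 81 then dp
  else dp.setIfInBounds i.toNat
    (fVal n dp (i + fdg s) + fVal n dp (i + 3) + fVal n dp (s * 2 - 1 - start))

def f_alt (start : Int) (stop : Int) : Int :=
  if start = stop then 1
  else if stop < start ∨ start = 81 then 0
  else
    let n := stop - start
    let dp0 := (Array.replicate (n + 1).toNat 0).setIfInBounds n.toNat 1
    let dp := (PySem.List.pyRange (n - 1) (-1) (-1)).foldl (fStep start n) dp0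
    dp.getD 0 0   -- dp[0]; the table is non-empty on this branch

-- ===== PRECONDITION & SPEC =====
-- Pre_f excludes exactly the inputs on which Python's A does not return: for start ≤ 1 with
-- start < stop and start ≠ 81, A either raises ValueError (negative start: int('-')) or
-- recurses forever (start = 0 via +int(str(0)[0]) = +0; start = 1 via start*2-1 = 1).
def Pre_f (start : Int) (stop : Int) : Prop := 2 ≤ start ∨ stop ≤ start ∨ start = 81
instance (start : Int) (stop : Int) : Decidable (Pre_f start stop) := by unfold Pre_f; infer_instance
def pvWitness_f : Int × Int := (2, 12)

def Spec_f (start : Int) (stop : Int) (out : Int) : Prop := out = f_alt start stop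
instance (start : Int) (stop : Int) (out : Int) : Decidable (Spec_f start stop out) := by unfold Spec_f; infer_instance

-- ===== CLAIM (what is proved, stated in full; the proofs are below) =====
def Claim_equal_f : Prop := ∀ (start : Int) (stop : Int), Dom_f start stop → Pre_f start stop → Spec_f start stop (f start stop)

-- ===== LEMMAS AND PROOFS =====


lemma fAux_succ (stop : Int) (fuel : Nat) (s : Int) :
    fAux stop (fuel + 1) s = if s = stop then some 1 else if stop < s ∨ s = 81 then some 0
      else
        (fdg? s).bind fun d =>
        (fAux stop fuel (s + d)).bind fun x =>
        (fAux stop fuel (s + 3)).bind fun y =>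
        (fAux stop fuel (s * 2 - 1)).bind fun z =>
        some (x + y + z) := rfl

-- the leading decimal digit of a positive Nat is 1..9
lemma toDigitsCore_head (fuel n : Nat) (acc : List Char) (h1 : 1 ≤ n) (h2 : n ≤ fuel) :
    ∃ (m : Nat) (t : List Char), 1 ≤ m ∧ m ≤ 9 ∧ Nat.toDigitsCore 10 fuel n acc = Nat.digitChar m :: t := by
  induction fuel generalizing n acc with
  | zero => omega
  | succ fl ih =>
    rw [Nat.toDigitsCore]
    by_cases h : n / 10 = 0
    · exact ⟨n % 10, acc, by omega, by omega, by simp [h]⟩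
    · obtain ⟨m, t, hm1, hm9, ht⟩ := ih (n / 10) (Nat.digitChar (n % 10) :: acc) (by omega) (by omega)
      exact ⟨m, t, hm1, hm9, by simp [h, ht]⟩

lemma fdg_bounds (s : Int) (h : 1 ≤ s) :
    fdg? s = some (fdg s) ∧ 1 ≤ fdg s ∧ fdg s ≤ 9 := by
  obtain ⟨m, t, hm1, hm9, ht⟩ := toDigitsCore_head (s.toNat + 1) s.toNat [] (by omega) (by omega)
  have htc : PySem.Int.toChars s = Nat.digitChar m :: t := by
    simp only [PySem.Int.toChars, if_neg (by omega : ¬ s < 0)]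
    exact ht
  rw [fdg, fdg?, htc, PySem.List.pyGet?_zero_cons]
  interval_cases m <;> decide

-- fAux is some 0 strictly above stop, with any positive fuel
lemma fAux_gt (stop : Int) (fuel : Nat) (s : Int) (h : stop < s) (hf : 0 < fuel) :
    fAux stop fuel s = some 0 := by
  obtain ⟨a, rfl⟩ := Nat.exists_eq_succ_of_ne_zero (by omega : fuel ≠ 0)
  rw [fAux_succ, if_neg (by omega : ¬ s = stop), if_pos (Or.inl h)]

-- enough fuel: the recursion returns, and the value does not depend on the exact fuel
lemma fAux_canon (stop : Int) (k : Nat) :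
    ∀ (fuel : Nat) (s : Int), 2 ≤ s → (stop - s).toNat ≤ k → (stop - s).toNat < fuel →
      fAux stop fuel s = fAux stop ((stop - s).toNat + 1) s ∧ (fAux stop fuel s).isSome := by
  induction k using Nat.strong_induction_on with
  | _ k ih =>
    intro fuel s hs hk hf
    obtain ⟨a, rfl⟩ := Nat.exists_eq_succ_of_ne_zero (by omega : fuel ≠ 0)
    obtain ⟨c, hc⟩ : ∃ c, (stop - s).toNat + 1 = c + 1 := ⟨(stop - s).toNat, rfl⟩
    rw [hc, fAux_succ, fAux_succ]
    by_cases h1 : s = stop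
    · rw [if_pos h1, if_pos h1]; exact ⟨rfl, rfl⟩
    · rw [if_neg h1, if_neg h1]
      by_cases h2 : stop < s ∨ s = 81
      · rw [if_pos h2, if_pos h2]; exact ⟨rfl, rfl⟩
      · rw [if_neg h2, if_neg h2]
        have hlt : s < stop := by omega
        have hcpos : 0 < c := by omega
        obtain ⟨hd, hd1, hd9⟩ := fdg_bounds s (by omega)
        have child : ∀ s' : Int, s + 1 ≤ s' → fAux stop a s' = fAux stop c s' ∧ (fAux stop a s').isSome := by
          intro s' hs'
          by_cases hgt : stop < s'
          · rw [fAux_gt stop a s' hgt (by omega), fAux_gt stop c s' hgt (by omega)]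
            exact ⟨rfl, rfl⟩
          · have hb : (stop - s').toNat < k := by omega
            obtain ⟨ea, sa⟩ := ih ((stop - s').toNat) hb a s' (by omega) (le_refl _) (by omega)
            obtain ⟨ec, _⟩ := ih ((stop - s').toNat) hb c s' (by omega) (le_refl _) (by omega)
            exact ⟨ea.trans ec.symm, sa⟩
        obtain ⟨e1, s1⟩ := child (s + fdg s) (by omega)
        obtain ⟨e2, s2⟩ := child (s + 3) (by omega)
        obtain ⟨e3, s3⟩ := child (s * 2 - 1) (by omega)
        obtain ⟨x, hx⟩ := Option.isSome_iff_exists.mp s1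
        obtain ⟨y, hy⟩ := Option.isSome_iff_exists.mp s2
        obtain ⟨z, hz⟩ := Option.isSome_iff_exists.mp s3
        simp only [hd, hx, e1.symm.trans hx, hy, e2.symm.trans hy, hz, e3.symm.trans hz,
          Option.bind_some]
        exact ⟨trivial, rfl⟩

-- the canonical value of A's recursion
def F (stop s : Int) : Int := (fAux stop ((stop - s).toNat + 1) s).getD 0

lemma fAux_suff (stop : Int) (fuel : Nat) (s : Int) (hs : 2 ≤ s) (h : (stop - s).toNat < fuel) :
    fAux stop fuel s = some (F stop s) := by
  obtain ⟨he, hsm⟩ := fAux_canon stop ((stop - s).toNat) fuel s hs (le_refl _) h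
  rw [F, ← he]
  obtain ⟨v, hv⟩ := Option.isSome_iff_exists.mp hsm
  rw [hv]; rfl

lemma F_gt (stop s : Int) (h : stop < s) : F stop s = 0 := by
  rw [F, fAux_gt stop _ s h (by omega)]; rfl

lemma F_stop (stop : Int) : F stop stop = 1 := by
  obtain ⟨c, hc⟩ : ∃ c, (stop - stop).toNat + 1 = c + 1 := ⟨(stop - stop).toNat, rfl⟩
  rw [F, hc, fAux_succ, if_pos rfl]; rfl

lemma F_81 (stop : Int) (h : 81 < stop) : F stop 81 = 0 := by
  obtain ⟨c, hc⟩ : ∃ c, (stop - 81).toNat + 1 = c + 1 := ⟨(stop - 81).toNat, rfl⟩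
  rw [F, hc, fAux_succ, if_neg (by omega : ¬ (81 : Int) = stop), if_pos (Or.inr rfl)]; rfl

lemma F_rec (stop s : Int) (hs : 2 ≤ s) (hlt : s < stop) (h81 : s ≠ 81) :
    F stop s = F stop (s + fdg s) + F stop (s + 3) + F stop (s * 2 - 1) := by
  obtain ⟨hd, hd1, hd9⟩ := fdg_bounds s (by omega)
  have step : ∀ s' : Int, s + 1 ≤ s' → fAux stop ((stop - s).toNat) s' = some (F stop s') := by
    intro s' hs'
    by_cases hgt : stop < s'
    · rw [fAux_gt stop _ s' hgt (by omega), F_gt stop s' hgt]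
    · exact fAux_suff stop _ s' (by omega) (by omega)
  obtain ⟨c, hc⟩ : ∃ c, (stop - s).toNat = c + 1 := ⟨(stop - s).toNat - 1, by omega⟩
  have e3 : (stop - s).toNat + 1 = c + 1 + 1 := by omega
  rw [F, e3, fAux_succ, if_neg (by omega : ¬ s = stop), if_neg (by omega : ¬ (stop < s ∨ s = 81)),
    ← hc, hd, Option.bind_some, step (s + fdg s) (by omega), step (s + 3) (by omega),
    step (s * 2 - 1) (by omega), Option.bind_some, Option.bind_some, Option.bind_some]
  rfl

-- peel the last element of a countdown range
lemma pyRange_neg_one_snoc (a b : Int) (h : b < a) :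
    PySem.List.pyRange a b (-1) = PySem.List.pyRange a (b + 1) (-1) ++ [b + 1] := by
  rw [PySem.List.pyRange_neg_one_eq_reverse, PySem.List.pyRange_neg_one_eq_reverse,
    PySem.List.pyRange_one_cons (by omega : b + 1 < a + 1)]
  simp

-- the DP table holds A's value at every index already filled, 0 elsewhere
lemma dp_inv (start n : Int) (hs : 2 ≤ start) (hn : 1 ≤ n) (m : Nat) :
    ∀ (k : Int), 0 ≤ k → k ≤ n → (n - k).toNat = m →
      ((PySem.List.pyRange (n - 1) (k - 1) (-1)).foldl (fStep start n)
          ((Array.replicate (n + 1).toNat 0).setIfInBounds n.toNat 1)).size = (n + 1).toNat ∧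
      ∀ j : Int, 0 ≤ j → j ≤ n →
        ((PySem.List.pyRange (n - 1) (k - 1) (-1)).foldl (fStep start n)
            ((Array.replicate (n + 1).toNat 0).setIfInBounds n.toNat 1)).getD j.toNat 0
          = if k ≤ j then F (start + n) (start + j) else 0 := by
  induction m with
  | zero =>
    intro k hk0 hkn hm
    have hkn' : k = n := by omega
    rw [PySem.List.pyRange_neg_one_eq_nil (by omega : n - 1 ≤ k - 1)]
    simp only [List.foldl_nil]
    have hszr : (Array.replicate (n + 1).toNat (0:Int)).size = (n + 1).toNat :=
      Array.size_replicate
    refine ⟨by rw [Array.size_setIfInBounds, hszr], ?_⟩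
    intro j hj0 hjn
    rw [Array.getD_eq_getD_getElem?, Array.getElem?_setIfInBounds]
    by_cases hje : j = n
    · rw [hje, if_pos rfl, if_pos (by rw [Array.size_replicate]; omega), Option.getD_some,
        if_pos (by omega), F_stop]
    · rw [if_neg (by omega : ¬ n.toNat = j.toNat), Array.getElem?_replicate,
        if_pos (by omega : j.toNat < (n + 1).toNat), Option.getD_some, if_neg (by omega)]
  | succ m ih =>
    intro k hk0 hkn hm
    have hsnoc := pyRange_neg_one_snoc (n - 1) (k - 1) (by omega)
    have e1 : k - 1 + 1 = k := by omega
    rw [e1] at hsnoc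
    obtain ⟨hszi, hih⟩ := ih (k + 1) (by omega) (by omega) (by omega)
    have e2 : (k:Int) + 1 - 1 = k := by omega
    rw [e2] at hszi
    rw [e2] at hih
    rw [hsnoc, List.foldl_append, List.foldl_cons, List.foldl_nil]
    set d := (PySem.List.pyRange (n - 1) k (-1)).foldl (fStep start n)
      ((Array.replicate (n + 1).toNat 0).setIfInBounds n.toNat 1) with hd
    set stop := start + n with hstop
    have hval : ∀ j : Int, k + 1 ≤ j → fVal n d j = F stop (start + j) := by
      intro j hj
      by_cases hjn : j ≤ n
      · rw [fVal, if_pos ⟨by omega, hjn⟩, hih j (by omega) hjn, if_pos (by omega)]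
      · rw [fVal, if_neg (by omega), F_gt stop (start + j) (by omega)]
    have hrec : fStep start n d k = if start + k = 81 then d
        else d.setIfInBounds k.toNat (F stop (start + k)) := by
      rw [fStep]
      by_cases h81 : start + k = 81
      · rw [if_pos h81, if_pos h81]
      · rw [if_neg h81, if_neg h81,
          hval (k + fdg (start + k)) (by
            obtain ⟨_, hd1, _⟩ := fdg_bounds (start + k) (by omega)
            omega),
          hval (k + 3) (by omega), hval ((start + k) * 2 - 1 - start) (by omega)]
        have ea : start + (k + fdg (start + k)) = start + k + fdg (start + k) := by ring
        have eb : start + (k + 3) = start + k + 3 := by ring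
        have ec : start + ((start + k) * 2 - 1 - start) = (start + k) * 2 - 1 := by ring
        rw [ea, eb, ec, ← F_rec stop (start + k) (by omega) (by omega) h81]
    constructor
    · rw [hrec]
      split
      · exact hszi
      · rw [Array.size_setIfInBounds]; exact hszi
    · intro j hj0 hjn
      rw [hrec]
      by_cases h81 : start + k = 81
      · rw [if_pos h81, hih j hj0 hjn]
        by_cases hjk : j = k
        · rw [hjk, if_neg (by omega), if_pos le_rfl, h81, F_81 stop (by omega)]
        · by_cases hkj : k ≤ j
          · rw [if_pos (by omega), if_pos hkj]
          · rw [if_neg (by omega), if_neg hkj]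
      · rw [if_neg h81]
        rw [Array.getD_eq_getD_getElem?, Array.getElem?_setIfInBounds]
        by_cases hjk : j = k
        · rw [hjk, if_pos rfl, if_pos (by rw [hszi]; omega), Option.getD_some, if_pos le_rfl]
        · rw [if_neg (by omega : ¬ k.toNat = j.toNat)]
          have hh := hih j hj0 hjn
          rw [Array.getD_eq_getD_getElem?] at hh
          rw [hh]
          by_cases hkj : k ≤ j
          · rw [if_pos (by omega), if_pos hkj]
          · rw [if_neg (by omega), if_neg hkj]

-- ===== VERDICT (by name: the statement is the Claim_ definition above) =====
theorem f_spec : Claim_equal_f := by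
  intro start stop _ hpre
  unfold Spec_f f f_alt
  by_cases h1 : start = stop
  · subst h1
    obtain ⟨c, hc⟩ : ∃ c, (start - start).toNat + 1 = c + 1 := ⟨(start - start).toNat, rfl⟩
    rw [hc, fAux_succ, if_pos rfl, if_pos rfl]; rfl
  · rw [if_neg h1]
    by_cases h2 : stop < start ∨ start = 81
    · rw [if_pos h2]
      obtain ⟨c, hc⟩ : ∃ c, (stop - start).toNat + 1 = c + 1 := ⟨(stop - start).toNat, rfl⟩
      rw [hc, fAux_succ, if_neg h1, if_pos h2]; rfl
    · rw [if_neg h2]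
      have hstart2 : 2 ≤ start := by
        rcases hpre with h | h | h
        · exact h
        · omega
        · exact absurd (Or.inr h) h2
      obtain ⟨_, hinv⟩ := dp_inv start (stop - start) hstart2 (by omega) ((stop - start).toNat)
        0 le_rfl (by omega) (by omega)
      have h0 := hinv 0 le_rfl (by omega)
      have e4 : start + (stop - start) = stop := by omega
      have e5 : (0:Int) - 1 = -1 := by norm_num
      rw [if_pos le_rfl, e4, add_zero, e5] at h0
      show (fAux stop ((stop - start).toNat + 1) start).getD 0 =
        ((PySem.List.pyRange (stop - start - 1) (-1) (-1)).foldl (fStep start (stop - start))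
          ((Array.replicate (stop - start + 1).toNat 0).setIfInBounds (stop - start).toNat 1)).getD (0:Int).toNat 0
      rw [h0]
      rfl
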